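-- pv_equiv track=rewrite | github.com/kilianyp/person-multi-task-dataset | datasets/pose_dataset.py | build_mapping_pairs
-- ===== SOURCE A (Python) =====
-- def build_mapping_pairs(ids):
--     mirror_pairs = list()
--     mapped = set()
--     for name, join_id in ids.items():
--         if name in mapped:
--             continue
--         if name.startswith('r_'):
--             joint1 = join_id
--             name2 = 'l_' + name[2:]
--             joint2 = ids[name2]
--         elif name.startswith('l_'):
--             joint1 = join_id
--             name2 = 'r_' + name[2:]
--             joint2 = ids[name2]
--         else:
--             continue
--         mirror_pairs.append((joint1, joint2))
--         # only adding name 2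
--         mapped.add(name2)
--     return mirror_pairs
-- ===== SOURCE B (Python) =====
-- def build_mapping_pairs(ids):
--     # Positional-index formulation: compare iteration positions instead of
--     # carrying a 'mapped' set; emit a pair at the earlier-seen member.
--     pos = {name: i for i, name in enumerate(ids)}
--     pairs = []
--     for name, join_id in ids.items():
--         if name.startswith('r_'):
--             other = 'l_' + name[2:]
--         elif name.startswith('l_'):
--             other = 'r_' + name[2:]
--         else:
--             continue
--         if pos[name] < pos[other]:
--             pairs.append((join_id, ids[other]))
--     return pairs
-- ===== Notes on version B (the rewrite author's own statement) =====
-- stated objective: alternative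
-- what changed: B replaces A's incrementally-built 'mapped' set and stateful skip logic with an upfront positional index of the dict keys and a stateless comparison: a pair is emitted exactly at the earlier-positioned member of each l_/r_ pair.
import Mathlib
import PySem

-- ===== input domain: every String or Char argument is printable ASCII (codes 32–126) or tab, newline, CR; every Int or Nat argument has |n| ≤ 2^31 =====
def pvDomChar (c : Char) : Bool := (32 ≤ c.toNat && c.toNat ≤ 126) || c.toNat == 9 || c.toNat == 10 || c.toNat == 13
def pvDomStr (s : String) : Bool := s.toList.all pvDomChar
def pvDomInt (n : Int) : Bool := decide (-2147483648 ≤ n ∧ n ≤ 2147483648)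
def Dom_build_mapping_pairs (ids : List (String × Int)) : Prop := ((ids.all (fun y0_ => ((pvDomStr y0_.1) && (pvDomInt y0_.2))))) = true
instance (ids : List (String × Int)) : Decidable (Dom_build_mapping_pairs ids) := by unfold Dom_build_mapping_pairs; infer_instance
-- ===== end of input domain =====

-- B replaces A's incrementally-built 'mapped' set by an upfront positional index of the keys
-- and a stateless position comparison (objective: alternative decomposition, same cost).


-- ===== PORT A =====
-- A's loop: skip names already in 'mapped'; for an 'r_'/'l_' name look up the mirror key
-- (KeyError → none branch, excluded by Pre_), append the pair and add the partner to 'mapped'.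
def pvLoopA (d : PySem.Dict String Int) :
    List (String × Int) → List (Int × Int) → PySem.Set String → List (Int × Int)
  | [], mirror_pairs, _ => mirror_pairs
  | (name, join_id) :: rest, mirror_pairs, mapped =>
    if PySem.Set.contains mapped name then
      pvLoopA d rest mirror_pairs mapped
    else if PySem.Str.startswith name "r_" then
      -- name2 = 'l_' + name[2:]
      match PySem.Dict.get? d ("l_" ++ PySem.Str.slice name (some 2) none) with
      | some joint2 =>
        pvLoopA d rest (mirror_pairs ++ [(join_id, joint2)])
          (PySem.Set.add mapped ("l_" ++ PySem.Str.slice name (some 2) none))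
      | none => mirror_pairs            -- KeyError (outside Pre_)
    else if PySem.Str.startswith name "l_" then
      -- name2 = 'r_' + name[2:]
      match PySem.Dict.get? d ("r_" ++ PySem.Str.slice name (some 2) none) with
      | some joint2 =>
        pvLoopA d rest (mirror_pairs ++ [(join_id, joint2)])
          (PySem.Set.add mapped ("r_" ++ PySem.Str.slice name (some 2) none))
      | none => mirror_pairs            -- KeyError (outside Pre_)
    else
      pvLoopA d rest mirror_pairs mapped

def build_mapping_pairs (ids : List (String × Int)) : List (Int × Int) :=
  let d := PySem.Dict.ofList ids
  pvLoopA d d.items [] PySem.Set.empty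

-- ===== PORT B =====
-- B's loop: compute the mirror name, then compare iteration positions via the 'pos' index;
-- emit (join_id, ids[other]) only at the earlier-seen member of the pair.
def pvLoopB (d : PySem.Dict String Int) (pos : PySem.Dict String Int) :
    List (String × Int) → List (Int × Int) → List (Int × Int)
  | [], pairs => pairs
  | (name, join_id) :: rest, pairs =>
    let other? : Option String :=
      if PySem.Str.startswith name "r_" then some ("l_" ++ PySem.Str.slice name (some 2) none)
      else if PySem.Str.startswith name "l_" then some ("r_" ++ PySem.Str.slice name (some 2) none)
      else none
    match other? with
    | none => pvLoopB d pos rest pairs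
    | some other =>
      match PySem.Dict.get? pos name, PySem.Dict.get? pos other with
      | some pn, some po =>
        if pn < po then
          match PySem.Dict.get? d other with
          | some j2 => pvLoopB d pos rest (pairs ++ [(join_id, j2)])
          | none => pairs               -- KeyError (outside Pre_)
        else pvLoopB d pos rest pairs
      | _, _ => pairs                   -- KeyError on pos lookup (outside Pre_)

def build_mapping_pairs_alt (ids : List (String × Int)) : List (Int × Int) :=
  let d := PySem.Dict.ofList ids
  -- pos = {name: i for i, name in enumerate(ids)}
  let pos := (PySem.List.enumerate (PySem.Dict.keys d) 0).foldl
      (fun p q => PySem.Dict.insert p q.2 q.1) PySem.Dict.empty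
  pvLoopB d pos d.items []

-- ===== PRECONDITION & SPEC =====
-- Pre_ excludes exactly the inputs on which Python A raises KeyError: some key starting with
-- 'r_'/'l_' whose mirror key is absent.
def Pre_build_mapping_pairs (ids : List (String × Int)) : Prop :=
  ∀ p ∈ ids,
    (PySem.Str.startswith p.1 "r_" = true → ("l_" ++ PySem.Str.slice p.1 (some 2) none) ∈ ids.map Prod.fst) ∧
    (PySem.Str.startswith p.1 "l_" = true → ("r_" ++ PySem.Str.slice p.1 (some 2) none) ∈ ids.map Prod.fst)
instance (ids : List (String × Int)) : Decidable (Pre_build_mapping_pairs ids) := by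
  unfold Pre_build_mapping_pairs; infer_instance

def pvWitness_build_mapping_pairs : (List (String × Int)) :=
  [("r_hip", 1), ("l_hip", 2), ("nose", 3)]

def Spec_build_mapping_pairs (ids : List (String × Int)) (out : List (Int × Int)) : Prop := out = build_mapping_pairs_alt ids
instance (ids : List (String × Int)) (out : List (Int × Int)) : Decidable (Spec_build_mapping_pairs ids out) := by unfold Spec_build_mapping_pairs; infer_instance

-- ===== CLAIM (what is proved, stated in full; the proofs are below) =====
def Claim_equal_build_mapping_pairs : Prop := ∀ (ids : List (String × Int)), Dom_build_mapping_pairs ids → Pre_build_mapping_pairs ids → Spec_build_mapping_pairs ids (build_mapping_pairs ids)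

-- ===== LEMMAS AND PROOFS =====

-- proof-side description of the mirror-name computation both loops perform
def pvOther (name : String) : Option String :=
  if PySem.Str.startswith name "r_" then some ("l_" ++ PySem.Str.slice name (some 2) none)
  else if PySem.Str.startswith name "l_" then some ("r_" ++ PySem.Str.slice name (some 2) none)
  else none


lemma toList_slice_from_two (s : String) :
    (PySem.Str.slice s (some 2) none).toList = s.toList.drop 2 := by
  rw [PySem.Str.toList_slice, PySem.Chars.slice_eq_listSlice]
  exact_mod_cast PySem.List.slice_from_natCast s.toList 2

lemma startswith_iff_toList (s p : String) :
    PySem.Str.startswith s p = true ↔ p.toList <+: s.toList := by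
  rw [PySem.Str.startswith_eq, PySem.Chars.startswith_iff]

lemma startswith_r_shape {n : String} (h : PySem.Str.startswith n "r_" = true) :
    n.toList = 'r' :: '_' :: n.toList.drop 2 := by
  rw [startswith_iff_toList, show ("r_" : String).toList = ['r','_'] from by decide] at h
  obtain ⟨t, ht⟩ := h
  rw [← ht]; simp

lemma startswith_l_shape {n : String} (h : PySem.Str.startswith n "l_" = true) :
    n.toList = 'l' :: '_' :: n.toList.drop 2 := by
  rw [startswith_iff_toList, show ("l_" : String).toList = ['l','_'] from by decide] at h
  obtain ⟨t, ht⟩ := h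
  rw [← ht]; simp

lemma toList_l_partner (n : String) :
    ("l_" ++ PySem.Str.slice n (some 2) none).toList = 'l' :: '_' :: n.toList.drop 2 := by
  rw [String.toList_append, toList_slice_from_two,
    show ("l_" : String).toList = ['l','_'] from by decide]
  rfl

lemma toList_r_partner (n : String) :
    ("r_" ++ PySem.Str.slice n (some 2) none).toList = 'r' :: '_' :: n.toList.drop 2 := by
  rw [String.toList_append, toList_slice_from_two,
    show ("r_" : String).toList = ['r','_'] from by decide]
  rfl

lemma sw_true_of_toList {s : String} {c c' : Char} {t : List Char} (h : s.toList = c :: c' :: t)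
    {p : String} (hp : p.toList = [c, c']) : PySem.Str.startswith s p = true := by
  rw [startswith_iff_toList, hp, h]
  exact ⟨t, rfl⟩

lemma sw_false_of_toList {s : String} {c c' : Char} {t : List Char} (h : s.toList = c :: c' :: t)
    {p : String} {b b' : Char} (hp : p.toList = [b, b']) (hb : b ≠ c) :
    PySem.Str.startswith s p = false := by
  rw [← Bool.not_eq_true, startswith_iff_toList, hp, h]
  intro hc
  obtain ⟨u, hu⟩ := hc
  simp at hu
  exact hb hu.1

lemma pvOther_symm {n m : String} (h : pvOther n = some m) : pvOther m = some n := by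
  unfold pvOther at h ⊢
  by_cases hr : PySem.Str.startswith n "r_" = true
  · rw [if_pos hr, Option.some.injEq] at h
    have hm : m.toList = 'l' :: '_' :: n.toList.drop 2 := by rw [← h]; exact toList_l_partner n
    rw [if_neg (by rw [sw_false_of_toList hm (p := "r_") (b := 'r') (b' := '_') (by decide) (by decide)]; simp),
        if_pos (sw_true_of_toList hm (p := "l_") (by decide))]
    congr 1
    apply String.toList_inj.mp
    rw [toList_r_partner, hm]
    simpa using (startswith_r_shape hr).symm
  · by_cases hl : PySem.Str.startswith n "l_" = true
    · rw [if_neg hr, if_pos hl, Option.some.injEq] at h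
      have hm : m.toList = 'r' :: '_' :: n.toList.drop 2 := by rw [← h]; exact toList_r_partner n
      rw [if_pos (sw_true_of_toList hm (p := "r_") (by decide))]
      congr 1
      apply String.toList_inj.mp
      rw [toList_l_partner, hm]
      simpa using (startswith_l_shape hl).symm
    · rw [if_neg hr, if_neg hl] at h
      exact absurd h (by simp)

lemma pvOther_ne {n m : String} (h : pvOther n = some m) : m ≠ n := by
  unfold pvOther at h
  intro he
  by_cases hr : PySem.Str.startswith n "r_" = true
  · rw [if_pos hr, Option.some.injEq] at h
    have hm : m.toList = 'l' :: '_' :: n.toList.drop 2 := by rw [← h]; exact toList_l_partner n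
    rw [he, startswith_r_shape hr] at hm
    simp at hm
  · by_cases hl : PySem.Str.startswith n "l_" = true
    · rw [if_neg hr, if_pos hl, Option.some.injEq] at h
      have hm : m.toList = 'r' :: '_' :: n.toList.drop 2 := by rw [← h]; exact toList_r_partner n
      rw [he, startswith_l_shape hl] at hm
      simp at hm
    · rw [if_neg hr, if_neg hl] at h
      exact absurd h (by simp)

lemma pos_get?_iff (ks : List String) (hnd : ks.Nodup) (x : String) (i : Int) :
    PySem.Dict.get? ((PySem.List.enumerate ks 0).foldl
        (fun p q => PySem.Dict.insert p q.2 q.1) PySem.Dict.empty) x = some i ↔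
      ∃ k : Nat, i = (k : Int) ∧ ks[k]? = some x := by
  have hfresh : ∀ a ∈ PySem.List.enumerate ks 0,
      (PySem.Dict.empty : PySem.Dict String Int).contains a.2 = false := by
    intro a _; simp [pysem]
  have hmapnd : ((PySem.List.enumerate ks 0).map (fun a => a.2)).Nodup := by
    rw [PySem.List.map_snd_enumerate]; exact hnd
  have hitems := PySem.Dict.items_foldl_insert_fresh (PySem.List.enumerate ks 0)
      (fun a => a.2) (fun a => a.1) PySem.Dict.empty hfresh hmapnd
  have hkeys : ((PySem.List.enumerate ks 0).foldl
      (fun p q => PySem.Dict.insert p q.2 q.1) PySem.Dict.empty).keys.Nodup := by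
    exact PySem.Dict.nodup_keys_foldl_insert_key (PySem.List.enumerate ks 0)
      (fun a => a.2) (fun _ a => a.1) PySem.Dict.empty (by simp [PySem.Dict.empty])
  rw [PySem.Dict.get?_eq_some_iff_mem_items _ _ _ hkeys, hitems]
  simp only [List.mem_append, List.mem_map]
  constructor
  · rintro (h | ⟨a, ha, he⟩)
    · simp [PySem.Dict.empty] at h
    · rw [PySem.List.mem_enumerate_iff] at ha
      obtain ⟨k, hk, rfl⟩ := ha
      simp only [Prod.mk.injEq] at he
      exact ⟨k, by omega, by rw [List.getElem?_eq_getElem hk, he.1]⟩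
  · rintro ⟨k, rfl, hk⟩
    right
    rw [List.getElem?_eq_some_iff] at hk
    obtain ⟨hlt, hx⟩ := hk
    exact ⟨((k : Int), ks[k]), by rw [PySem.List.mem_enumerate_iff]; exact ⟨k, hlt, by simp⟩, by simp [hx]⟩

-- main loop equivalence, by induction on the remaining items
lemma loop_eq (d pos : PySem.Dict String Int)
    (restL : List (String × Int)) (pre : List String)
    (mapped : PySem.Set String) (acc : List (Int × Int))
    (hnd : (pre ++ restL.map Prod.fst).Nodup)
    (hpos : ∀ x (i : Int), PySem.Dict.get? pos x = some i ↔
        ∃ k : Nat, i = (k : Int) ∧ (pre ++ restL.map Prod.fst)[k]? = some x)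
    (hclo : ∀ x ∈ pre ++ restL.map Prod.fst, ∀ m, pvOther x = some m → m ∈ pre ++ restL.map Prod.fst)
    (hget : ∀ p ∈ restL, PySem.Dict.get? d p.1 = some p.2)
    (hmap : ∀ x ∈ restL.map Prod.fst,
        (PySem.Set.contains mapped x = true ↔ ∃ m, pvOther x = some m ∧ m ∈ pre)) :
    pvLoopA d restL acc mapped = pvLoopB d pos restL acc := by
  induction restL generalizing pre mapped acc with
  | nil => rfl
  | cons p rest ih =>
    obtain ⟨n, v⟩ := p
    have hL : pre ++ ((n, v) :: rest).map Prod.fst = (pre ++ [n]) ++ rest.map Prod.fst := by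
      simp
    have hnr : n ∈ pre ++ ((n, v) :: rest).map Prod.fst := by simp
    have hposn : PySem.Dict.get? pos n = some ((pre.length : Nat) : Int) :=
      (hpos n _).mpr ⟨pre.length, rfl, by rw [List.getElem?_append_right le_rfl]; simp⟩
    have hdisj : ∀ a ∈ pre, a ∉ (n :: rest.map Prod.fst) := by
      rw [show pre ++ ((n, v) :: rest).map Prod.fst = pre ++ (n :: rest.map Prod.fst) from by simp,
        List.nodup_append] at hnd
      intro a ha hb
      exact hnd.2.2 a ha a hb rfl
    -- applying the induction hypothesis after moving n into the processed prefix
    have ihapp : ∀ (mapped' : PySem.Set String) (acc' : List (Int × Int)),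
        (∀ x ∈ rest.map Prod.fst,
          (PySem.Set.contains mapped' x = true ↔ ∃ m, pvOther x = some m ∧ m ∈ pre ++ [n])) →
        pvLoopA d rest acc' mapped' = pvLoopB d pos rest acc' := by
      intro mapped' acc' hmap'
      refine ih (pre ++ [n]) mapped' acc' ?_ ?_ ?_ ?_ hmap'
      · rw [← hL]; exact hnd
      · intro x i; rw [← hL]; exact hpos x i
      · intro x hx m hm; rw [← hL] at hx ⊢; exact hclo x hx m hm
      · intro q hq; exact hget q (List.mem_cons_of_mem _ hq)
    by_cases hcn : PySem.Set.contains mapped n = true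
    · -- A skips n (already mapped); B skips it because its partner sits earlier
      obtain ⟨m, hPn, hmpre⟩ := (hmap n (by simp)).mp hcn
      obtain ⟨k, hk⟩ := List.mem_iff_getElem?.mp hmpre
      obtain ⟨hklt, -⟩ := List.getElem?_eq_some_iff.mp hk
      have hposm : PySem.Dict.get? pos m = some ((k : Nat) : Int) :=
        (hpos m _).mpr ⟨k, rfl, by rw [List.getElem?_append_left hklt]; exact hk⟩
      rw [pvLoopA, if_pos hcn, pvLoopB]
      have hchain : (if PySem.Str.startswith n "r_" then
            some ("l_" ++ PySem.Str.slice n (some 2) none)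
          else if PySem.Str.startswith n "l_" then
            some ("r_" ++ PySem.Str.slice n (some 2) none)
          else none) = some m := hPn
      rw [hchain]
      change pvLoopA d rest acc mapped =
        match PySem.Dict.get? pos n, PySem.Dict.get? pos m with
        | some pn, some po =>
          if pn < po then
            (match PySem.Dict.get? d m with
              | some j2 => pvLoopB d pos rest (acc ++ [(v, j2)])
              | none => acc)
          else pvLoopB d pos rest acc
        | _, _ => acc
      rw [hposn, hposm]
      change pvLoopA d rest acc mapped =
        if (((pre.length : Nat) : Int) < ((k : Nat) : Int)) then
          (match PySem.Dict.get? d m with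
            | some j2 => pvLoopB d pos rest (acc ++ [(v, j2)])
            | none => acc)
        else pvLoopB d pos rest acc
      rw [if_neg (by omega)]
      refine ihapp mapped acc ?_
      intro x hx
      rw [hmap x (List.mem_cons_of_mem _ hx)]
      constructor
      · rintro ⟨m', h1, h2⟩; exact ⟨m', h1, List.mem_append_left _ h2⟩
      · rintro ⟨m', h1, h2⟩
        rcases List.mem_append.mp h2 with h2 | h2
        · exact ⟨m', h1, h2⟩
        · exfalso
          have hmn : m' = n := by simpa using h2
          subst hmn
          have h3 := pvOther_symm h1
          rw [hPn] at h3
          have hx' : x = m := (Option.some_inj.mp h3).symm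
          exact hdisj m hmpre (by rw [← hx']; exact List.mem_cons_of_mem _ hx)
    · have hcnf : PySem.Set.contains mapped n = false := by
        rwa [Bool.not_eq_true] at hcn
      cases hPn : pvOther n with
      | none =>
        have hr : PySem.Str.startswith n "r_" = false := by
          have h := hPn
          unfold pvOther at h
          by_contra hc
          rw [Bool.not_eq_false] at hc
          rw [if_pos hc] at h
          simp at h
        have hl : PySem.Str.startswith n "l_" = false := by
          have h := hPn
          unfold pvOther at h
          by_contra hc
          rw [Bool.not_eq_false] at hc
          rw [if_neg (by rw [hr]; simp), if_pos hc] at h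
          simp at h
        rw [pvLoopA, if_neg (by rw [hcnf]; simp), if_neg (by rw [hr]; simp),
          if_neg (by rw [hl]; simp), pvLoopB]
        have hchain : (if PySem.Str.startswith n "r_" then
              some ("l_" ++ PySem.Str.slice n (some 2) none)
            else if PySem.Str.startswith n "l_" then
              some ("r_" ++ PySem.Str.slice n (some 2) none)
            else none) = (none : Option String) := hPn
        rw [hchain]
        refine ihapp mapped acc ?_
        intro x hx
        rw [hmap x (List.mem_cons_of_mem _ hx)]
        constructor
        · rintro ⟨m', h1, h2⟩; exact ⟨m', h1, List.mem_append_left _ h2⟩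
        · rintro ⟨m', h1, h2⟩
          rcases List.mem_append.mp h2 with h2 | h2
          · exact ⟨m', h1, h2⟩
          · exfalso
            have hmn : m' = n := by simpa using h2
            subst hmn
            have h3 := pvOther_symm h1
            rw [hPn] at h3
            simp at h3
      | some m =>
        have hsymm := pvOther_symm hPn
        have hne : m ≠ n := pvOther_ne hPn
        have hmm : m ∈ pre ++ ((n, v) :: rest).map Prod.fst := hclo n hnr m hPn
        have hmnotpre : m ∉ pre := fun hc => hcn ((hmap n (by simp)).mpr ⟨m, hPn, hc⟩)
        have hmrest : m ∈ rest.map Prod.fst := by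
          rcases List.mem_append.mp hmm with h | h
          · exact absurd h hmnotpre
          · simp only [List.map_cons, List.mem_cons] at h
            rcases h with h | h
            · exact absurd h hne
            · exact h
        obtain ⟨j, hj⟩ := List.mem_iff_getElem?.mp hmrest
        have hposm : PySem.Dict.get? pos m = some (((pre.length + 1 + j : Nat)) : Int) :=
          (hpos m _).mpr ⟨pre.length + 1 + j, rfl, by
            rw [List.getElem?_append_right (by omega)]
            simp only [List.map_cons]
            rw [show pre.length + 1 + j - pre.length = j + 1 from by omega]
            simpa using hj⟩
        obtain ⟨⟨mm, v2⟩, hmv2, hfst⟩ := List.mem_map.mp hmrest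
        have hgd : PySem.Dict.get? d m = some v2 := by
          rw [← hfst]
          exact hget (mm, v2) (List.mem_cons_of_mem _ hmv2)
        have hmapadd : ∀ x ∈ rest.map Prod.fst,
            (PySem.Set.contains (PySem.Set.add mapped m) x = true ↔
              ∃ m', pvOther x = some m' ∧ m' ∈ pre ++ [n]) := by
          intro x hx
          have hcadd : PySem.Set.contains (PySem.Set.add mapped m) x = true ↔
              x ∈ mapped ∨ x = m := by
            rw [show PySem.Set.contains (PySem.Set.add mapped m) x
                = List.contains (PySem.Set.add mapped m) x from rfl,
              List.contains_iff_mem]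
            exact PySem.Set.mem_add mapped m x
          rw [hcadd]
          constructor
          · rintro (h | h)
            · obtain ⟨m', h1, h2⟩ := (hmap x (List.mem_cons_of_mem _ hx)).mp
                (by rw [show PySem.Set.contains mapped x = List.contains mapped x from rfl,
                    List.contains_iff_mem]; exact h)
              exact ⟨m', h1, List.mem_append_left _ h2⟩
            · subst h
              exact ⟨n, hsymm, by simp⟩
          · rintro ⟨m', h1, h2⟩
            rcases List.mem_append.mp h2 with h2 | h2
            · left
              have h3 := (hmap x (List.mem_cons_of_mem _ hx)).mpr ⟨m', h1, h2⟩
              rwa [show PySem.Set.contains mapped x = List.contains mapped x from rfl,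
                List.contains_iff_mem] at h3
            · right
              have hmn : m' = n := by simpa using h2
              subst hmn
              have h3 := pvOther_symm h1
              rw [hPn] at h3
              exact (Option.some_inj.mp h3).symm
        have hlt : ((pre.length : Nat) : Int) < (((pre.length + 1 + j : Nat)) : Int) := by
          push_cast; omega
        have hPn' := hPn
        unfold pvOther at hPn'
        by_cases hr : PySem.Str.startswith n "r_" = true
        · rw [if_pos hr, Option.some.injEq] at hPn'
          rw [pvLoopA, if_neg (by rw [hcnf]; simp), if_pos hr, pvLoopB]
          have hchain : (if PySem.Str.startswith n "r_" then
                some ("l_" ++ PySem.Str.slice n (some 2) none)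
              else if PySem.Str.startswith n "l_" then
                some ("r_" ++ PySem.Str.slice n (some 2) none)
              else none) = some m := hPn
          rw [hchain, hPn']
          change (match PySem.Dict.get? d m with
              | some joint2 => pvLoopA d rest (acc ++ [(v, joint2)]) (PySem.Set.add mapped m)
              | none => acc) =
            match PySem.Dict.get? pos n, PySem.Dict.get? pos m with
            | some pn, some po =>
              if pn < po then
                (match PySem.Dict.get? d m with
                  | some j2 => pvLoopB d pos rest (acc ++ [(v, j2)])
                  | none => acc)
              else pvLoopB d pos rest acc
            | _, _ => acc
          rw [hposn, hposm, hgd]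
          change (pvLoopA d rest (acc ++ [(v, v2)]) (PySem.Set.add mapped m)) =
            if (((pre.length : Nat) : Int) < (((pre.length + 1 + j : Nat)) : Int)) then
              (match (some v2 : Option Int) with
                | some j2 => pvLoopB d pos rest (acc ++ [(v, j2)])
                | none => acc)
            else pvLoopB d pos rest acc
          rw [if_pos hlt]
          exact ihapp (PySem.Set.add mapped m) (acc ++ [(v, v2)]) hmapadd
        · by_cases hl : PySem.Str.startswith n "l_" = true
          · rw [if_neg hr, if_pos hl, Option.some.injEq] at hPn'
            rw [pvLoopA, if_neg (by rw [hcnf]; simp), if_neg hr, if_pos hl, pvLoopB]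
            have hchain : (if PySem.Str.startswith n "r_" then
                  some ("l_" ++ PySem.Str.slice n (some 2) none)
                else if PySem.Str.startswith n "l_" then
                  some ("r_" ++ PySem.Str.slice n (some 2) none)
                else none) = some m := hPn
            rw [hchain, hPn']
            change (match PySem.Dict.get? d m with
                | some joint2 => pvLoopA d rest (acc ++ [(v, joint2)]) (PySem.Set.add mapped m)
                | none => acc) =
              match PySem.Dict.get? pos n, PySem.Dict.get? pos m with
              | some pn, some po =>
                if pn < po then
                  (match PySem.Dict.get? d m with
                    | some j2 => pvLoopB d pos rest (acc ++ [(v, j2)])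
                    | none => acc)
                else pvLoopB d pos rest acc
              | _, _ => acc
            rw [hposn, hposm, hgd]
            change (pvLoopA d rest (acc ++ [(v, v2)]) (PySem.Set.add mapped m)) =
              if (((pre.length : Nat) : Int) < (((pre.length + 1 + j : Nat)) : Int)) then
                (match (some v2 : Option Int) with
                  | some j2 => pvLoopB d pos rest (acc ++ [(v, j2)])
                  | none => acc)
              else pvLoopB d pos rest acc
            rw [if_pos hlt]
            exact ihapp (PySem.Set.add mapped m) (acc ++ [(v, v2)]) hmapadd
          · rw [if_neg hr, if_neg hl] at hPn'
            exact absurd hPn' (by simp)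

lemma mem_keys_ofList (ids : List (String × Int)) (x : String) :
    x ∈ (PySem.Dict.ofList ids).keys ↔ x ∈ ids.map Prod.fst := by
  have h := PySem.Dict.keys_foldl_insert_key (ν := Int) ids Prod.fst (fun _ p => p.2) PySem.Dict.empty
  rw [show PySem.Dict.ofList ids
      = List.foldl (fun (d : PySem.Dict String Int) (p : String × Int) => d.insert p.1 p.2)
          PySem.Dict.empty ids from rfl]
  rw [show (List.foldl (fun (d : PySem.Dict String Int) (p : String × Int) => d.insert p.1 p.2)
        PySem.Dict.empty ids)
      = (List.foldl (fun d x => d.insert (Prod.fst x)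
          ((fun (_ : PySem.Dict String Int) (p : String × Int) => p.2) d x)) PySem.Dict.empty ids)
      from rfl, h]
  rw [PySem.Set.mem_update]
  simp [PySem.Dict.empty, PySem.Dict.keys]

-- ===== VERDICT (by name: the statement is the Claim_ definition above) =====
theorem build_mapping_pairs_spec : Claim_equal_build_mapping_pairs := by
  unfold Claim_equal_build_mapping_pairs
  intro ids _hdom hpre
  unfold Spec_build_mapping_pairs build_mapping_pairs build_mapping_pairs_alt
  show pvLoopA (PySem.Dict.ofList ids) (PySem.Dict.ofList ids).items [] PySem.Set.empty
    = pvLoopB (PySem.Dict.ofList ids)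
        ((PySem.List.enumerate (PySem.Dict.keys (PySem.Dict.ofList ids)) 0).foldl
          (fun p q => PySem.Dict.insert p q.2 q.1) PySem.Dict.empty)
        (PySem.Dict.ofList ids).items []
  have hnodk := PySem.Dict.nodup_keys_ofList (κ := String) (ν := Int) ids
  have hkeq : (PySem.Dict.ofList ids).keys = (PySem.Dict.ofList ids).items.map Prod.fst := rfl
  refine loop_eq _ _ (PySem.Dict.ofList ids).items [] PySem.Set.empty [] ?_ ?_ ?_ ?_ ?_
  · simpa using (hkeq ▸ hnodk)
  · intro x i
    exact pos_get?_iff (PySem.Dict.ofList ids).keys hnodk x i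
  · intro x hx m hm
    simp only [List.nil_append] at hx ⊢
    rw [← hkeq, mem_keys_ofList] at hx
    obtain ⟨p, hp, rfl⟩ := List.mem_map.mp hx
    rw [← hkeq, mem_keys_ofList]
    unfold pvOther at hm
    by_cases hr : PySem.Str.startswith p.1 "r_" = true
    · rw [if_pos hr, Option.some.injEq] at hm
      rw [← hm]
      exact (hpre p hp).1 hr
    · by_cases hl : PySem.Str.startswith p.1 "l_" = true
      · rw [if_neg hr, if_pos hl, Option.some.injEq] at hm
        rw [← hm]
        exact (hpre p hp).2 hl
      · rw [if_neg hr, if_neg hl] at hm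
        exact absurd hm (by simp)
  · intro p hp
    exact PySem.Dict.get?_of_mem_items _ hp hnodk
  · intro x _
    constructor
    · intro h
      exact absurd h (by simp [PySem.Set.contains, PySem.Set.empty])
    · rintro ⟨m, -, h⟩
      exact absurd h (by simp)
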